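-- pv_equiv track=rewrite | github.com/Gloriel621/web-final | app.py | filter_sections
-- ===== SOURCE A (Python) =====
-- def filter_sections(text, exclude_headers):
--     """
--     Filter out sections based on exclude_headers.
--     """
--     lines = text.split('\n')
--     filtered_text = []
--     skip = False
--
--     for line in lines:
--         if any(header in line for header in exclude_headers):
--             skip = not skip
--             continue
--         if not skip:
--             filtered_text.append(line)
--
--     return '\n'.join(filtered_text)
-- ===== SOURCE B (Python) =====
-- def filter_sections(text, exclude_headers):
--     """
--     Filter out sections based on exclude_headers.
--     Different decomposition: split the lines into groups delimited by
--     header-matching lines (the delimiter lines are dropped), then keep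
--     only the even-indexed groups.
--     """
--     done = []
--     cur = []
--     for line in text.split('\n'):
--         if any(header in line for header in exclude_headers):
--             done.append(cur)
--             cur = []
--         else:
--             cur.append(line)
--     done.append(cur)
--
--     kept = []
--     rest = done
--     while rest:
--         kept.extend(rest[0])
--         rest = rest[2:]
--     return '\n'.join(kept)
-- ===== Notes on version B (the rewrite author's own statement) =====
-- stated objective: alternative
-- what changed: Replaces A's single toggling scan (a skip flag flipped by matching lines) with a build-groups-then-select decomposition: one pass splits the lines into groups at header-matching lines, a second pass concatenates only the even-indexed groups.
import Mathlib
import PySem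

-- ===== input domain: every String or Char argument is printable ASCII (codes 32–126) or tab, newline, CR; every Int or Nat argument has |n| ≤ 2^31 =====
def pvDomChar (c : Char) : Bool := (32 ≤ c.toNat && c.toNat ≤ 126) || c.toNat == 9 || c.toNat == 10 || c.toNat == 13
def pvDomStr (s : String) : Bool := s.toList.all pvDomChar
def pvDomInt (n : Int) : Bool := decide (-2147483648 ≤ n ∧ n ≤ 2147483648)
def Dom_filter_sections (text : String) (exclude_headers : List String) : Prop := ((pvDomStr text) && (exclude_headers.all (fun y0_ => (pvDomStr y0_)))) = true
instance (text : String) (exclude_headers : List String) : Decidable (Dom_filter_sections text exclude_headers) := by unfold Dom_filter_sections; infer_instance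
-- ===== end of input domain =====

-- B replaces A's toggling skip-flag scan with a build-groups-then-keep-even-groups decomposition (alternative objective, same cost).

-- ===== PORT A =====
-- A: one pass over the lines with a skip flag toggled by header-matching lines.
def filter_sections (text : String) (exclude_headers : List String) : String :=
  let lines := (PySem.Str.split? text "\n").getD []
  let st := lines.foldl
    (fun (st : List String × Bool) line =>
      if exclude_headers.any (fun header => PySem.Str.isIn header line) then
        (st.1, !st.2)
      else if !st.2 then (st.1 ++ [line], st.2) else st)
    ([], false)
  PySem.Str.join "\n" st.1

-- ===== PORT B =====
-- Source B's second pass: 'rest = done; while rest: kept.extend(rest[0]); rest = rest[2:]'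
def selEvens (rest : List (List String)) : List String :=
  match rest with
  | [] => []
  | [g] => g
  | g :: _ :: gs => g ++ selEvens gs


def filter_sections_alt (text : String) (exclude_headers : List String) : String :=
  let lines := (PySem.Str.split? text "\n").getD []
  let st := lines.foldl
    (fun (st : List (List String) × List String) line =>
      if exclude_headers.any (fun header => PySem.Str.isIn header line) then
        (st.1 ++ [st.2], [])
      else (st.1, st.2 ++ [line]))
    ([], [])
  let done := st.1 ++ [st.2]
  PySem.Str.join "\n" (selEvens done)

-- ===== PRECONDITION & SPEC =====
def Spec_filter_sections (text : String) (exclude_headers : List String) (out : String) : Prop := out = filter_sections_alt text exclude_headers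
instance (text : String) (exclude_headers : List String) (out : String) : Decidable (Spec_filter_sections text exclude_headers out) := by unfold Spec_filter_sections; infer_instance

-- ===== CLAIM (what is proved, stated in full; the proofs are below) =====
def Claim_equal_filter_sections : Prop := ∀ (text : String) (exclude_headers : List String), Dom_filter_sections text exclude_headers → Spec_filter_sections text exclude_headers (filter_sections text exclude_headers)

-- ===== LEMMAS AND PROOFS =====

-- reference form of A's loop: structural recursion on the lines carrying the skip flag
def loopA (exclude_headers : List String) (skip : Bool) (lines : List String) : List String :=
  match lines with
  | [] => []
  | l :: ls =>
    if exclude_headers.any (fun header => PySem.Str.isIn header l) then loopA exclude_headers (!skip) ls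
    else if skip then loopA exclude_headers skip ls
    else l :: loopA exclude_headers skip ls

theorem foldA_eq_loopA (hdrs : List String) (lines : List String) (acc : List String) (skip : Bool) :
    (lines.foldl
      (fun (st : List String × Bool) line =>
        if hdrs.any (fun header => PySem.Str.isIn header line) then (st.1, !st.2)
        else if !st.2 then (st.1 ++ [line], st.2) else st)
      (acc, skip)).1 = acc ++ loopA hdrs skip lines := by
  induction lines generalizing acc skip with
  | nil => simp [loopA]
  | cons l ls ih =>
    simp only [List.foldl_cons]
    rw [loopA]
    by_cases h : hdrs.any (fun header => PySem.Str.isIn header l) = true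
    · rw [if_pos h, if_pos h, ih]
    · rw [if_neg h, if_neg h]
      cases skip
      · simp only [Bool.not_false, if_pos, Bool.false_eq_true, if_false, ih]
        simp
      · simp only [Bool.not_true, Bool.false_eq_true, if_false, if_true, ih]

theorem selEvens_append_singleton (d : List (List String)) (x : List String) :
    selEvens (d ++ [x]) = selEvens d ++ (if d.length % 2 = 0 then x else []) := by
  induction d using selEvens.induct with
  | case1 => simp [selEvens]
  | case2 g => simp [selEvens]
  | case3 g h gs ih =>
    simp only [List.cons_append, selEvens, ih, List.length_cons]
    by_cases hp : gs.length % 2 = 0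
    · have h2 : (gs.length + 1 + 1) % 2 = 0 := by omega
      simp [hp, h2, List.append_assoc]
    · have h2 : ¬ ((gs.length + 1 + 1) % 2 = 0) := by omega
      simp [hp, h2]

theorem foldB_eq_loopA (hdrs : List String) (lines : List String)
    (d : List (List String)) (c : List String) :
    (let st := lines.foldl
        (fun (st : List (List String) × List String) line =>
          if hdrs.any (fun header => PySem.Str.isIn header line) then (st.1 ++ [st.2], [])
          else (st.1, st.2 ++ [line]))
        (d, c)
     selEvens (st.1 ++ [st.2]))
    = selEvens (d ++ [c]) ++ loopA hdrs (decide (d.length % 2 = 1)) lines := by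
  induction lines generalizing d c with
  | nil => simp [loopA]
  | cons l ls ih =>
    simp only [List.foldl_cons]
    rw [loopA]
    by_cases h : hdrs.any (fun header => PySem.Str.isIn header l) = true
    · rw [if_pos h, if_pos h, ih]
      rw [selEvens_append_singleton (d ++ [c]) []]
      have hd : (decide ((d ++ [c]).length % 2 = 1)) = !decide (d.length % 2 = 1) := by
        rcases Nat.mod_two_eq_zero_or_one d.length with hp | hp <;>
          simp [List.length_append, hp] <;> omega
      rw [hd, ite_self, List.append_nil]
    · rw [if_neg h, if_neg h, ih]
      rw [selEvens_append_singleton d (c ++ [l]), selEvens_append_singleton d c]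
      by_cases hp : d.length % 2 = 1
      · have h0 : ¬ (d.length % 2 = 0) := by omega
        simp [hp]
      · have h0 : d.length % 2 = 0 := by omega
        simp [h0, List.append_assoc]

-- ===== VERDICT (by name: the statement is the Claim_ definition above) =====
theorem filter_sections_spec : Claim_equal_filter_sections := by
  intro text exclude_headers _
  unfold Spec_filter_sections filter_sections filter_sections_alt
  have hA := foldA_eq_loopA exclude_headers ((PySem.Str.split? text "\n").getD []) [] false
  have hB := foldB_eq_loopA exclude_headers ((PySem.Str.split? text "\n").getD []) [] []
  simp only [] at hA hB ⊢
  rw [hA, hB]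
  simp [selEvens]
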